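-- pv_equiv track=rewrite | github.com/WenyuChiou/research-hub | src/research_hub/utils/doi.py | normalize_doi
-- ===== SOURCE A (Python) =====
-- _DOI_PREFIXES = (
--     "https://doi.org/",
--     "http://doi.org/",
--     "https://dx.doi.org/",
--     "http://dx.doi.org/",
--     "doi:",
--     "DOI:",
-- )
--
-- def normalize_doi(doi: str) -> str:
--     """Return a lowercase, prefix-stripped DOI string.
--
--     Examples:
--         >>> normalize_doi("https://doi.org/10.1038/S44168-025-00254-1")
--         '10.1038/s44168-025-00254-1'
--         >>> normalize_doi("doi:10.1145/3630106.3658942")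
--         '10.1145/3630106.3658942'
--         >>> normalize_doi("")
--         ''
--     """
--     if not doi:
--         return ""
--     cleaned = doi.strip()
--     for prefix in _DOI_PREFIXES:
--         if cleaned.lower().startswith(prefix.lower()):
--             cleaned = cleaned[len(prefix):]
--             break
--     return cleaned.strip().lower()
-- ===== SOURCE B (Python) =====
-- def normalize_doi(doi: str) -> str:
--     """Return a lowercase, prefix-stripped DOI string.
--
--     Lowercases first, then decides the prefix to drop by a scheme/host
--     decomposition (doi: label, or http(s):// followed by (dx.)doi.org/)
--     instead of scanning a tuple of full prefixes.
--     """
--     low = doi.strip().lower()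
--     if low.startswith("doi:"):
--         return low[4:].strip()
--     if low.startswith("https://"):
--         n = 8
--     elif low.startswith("http://"):
--         n = 7
--     else:
--         return low
--     rest = low[n:]
--     if rest.startswith("doi.org/"):
--         return low[n + 8:].strip()
--     if rest.startswith("dx.doi.org/"):
--         return low[n + 11:].strip()
--     return low
-- ===== Notes on version B (the rewrite author's own statement) =====
-- stated objective: alternative
-- what changed: B lowercases once up front and picks the prefix to drop by a scheme/host decomposition (a doi label, or an http(s) scheme followed by a doi host path) instead of scanning the tuple of six full prefixes with repeated lower()+startswith.
import Mathlib
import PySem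

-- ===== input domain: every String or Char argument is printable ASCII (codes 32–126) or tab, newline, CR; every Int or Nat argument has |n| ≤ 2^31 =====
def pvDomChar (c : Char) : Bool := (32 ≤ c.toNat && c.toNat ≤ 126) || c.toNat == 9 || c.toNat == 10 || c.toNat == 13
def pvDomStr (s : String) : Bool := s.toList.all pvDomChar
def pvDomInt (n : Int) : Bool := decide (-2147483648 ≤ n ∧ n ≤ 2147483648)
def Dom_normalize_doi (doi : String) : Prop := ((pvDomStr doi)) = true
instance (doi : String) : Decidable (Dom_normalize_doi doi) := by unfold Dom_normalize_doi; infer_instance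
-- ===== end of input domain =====

-- B replaces A's scan over six full prefixes (re-lowercasing per test) with one lowercase
-- up front and a scheme/host decomposition of the prefix; objective: alternative.

-- ===== PORT A =====
def pvDoiPrefixes : List String :=
  ["https://doi.org/", "http://doi.org/", "https://dx.doi.org/", "http://dx.doi.org/",
   "doi:", "DOI:"]

-- the 'for prefix in _DOI_PREFIXES: … break' loop
def pvStripLoop (cleaned : String) : List String → String
  | [] => cleaned
  | p :: ps =>
    if PySem.Str.startswith (PySem.Str.lower cleaned) (PySem.Str.lower p) then
      PySem.Str.slice cleaned (some (PySem.Str.len p)) none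
    else pvStripLoop cleaned ps

def normalize_doi (doi : String) : String :=
  if doi = "" then ""
  else
    let cleaned := PySem.Str.strip doi
    let cleaned2 := pvStripLoop cleaned pvDoiPrefixes
    PySem.Str.lower (PySem.Str.strip cleaned2)

-- ===== PORT B =====
-- shared tail of B: drop 'doi.org/' or 'dx.doi.org/' after a scheme of length n
def pvAltHost (low : String) (n : Int) : String :=
  let rest := PySem.Str.slice low (some n) none
  if PySem.Str.startswith rest "doi.org/" then
    PySem.Str.strip (PySem.Str.slice low (some (n + 8)) none)
  else if PySem.Str.startswith rest "dx.doi.org/" then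
    PySem.Str.strip (PySem.Str.slice low (some (n + 11)) none)
  else low

def normalize_doi_alt (doi : String) : String :=
  let low := PySem.Str.lower (PySem.Str.strip doi)
  if PySem.Str.startswith low "doi:" then
    PySem.Str.strip (PySem.Str.slice low (some 4) none)
  else if PySem.Str.startswith low "https://" then pvAltHost low 8
  else if PySem.Str.startswith low "http://" then pvAltHost low 7
  else low

-- ===== PRECONDITION & SPEC =====
def Spec_normalize_doi (doi : String) (out : String) : Prop := out = normalize_doi_alt doi
instance (doi : String) (out : String) : Decidable (Spec_normalize_doi doi out) := by unfold Spec_normalize_doi; infer_instance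

-- ===== CLAIM (what is proved, stated in full; the proofs are below) =====
def Claim_equal_normalize_doi : Prop := ∀ (doi : String), Dom_normalize_doi doi → Spec_normalize_doi doi (normalize_doi doi)

-- ===== LEMMAS AND PROOFS =====

-- strip of the tail that remains after dropping a prefix of length n from l
def pvT (l : List Char) (n : Nat) : List Char := PySem.Chars.strip (l.drop n)

lemma pv_append_prefix_iff {α : Type} (p q s : List α) :
    p ++ q <+: s ↔ p <+: s ∧ q <+: s.drop p.length := by
  constructor
  · rintro ⟨t, rfl⟩
    refine ⟨⟨q ++ t, by simp⟩, ?_⟩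
    rw [List.append_assoc, List.drop_left]
    exact ⟨t, rfl⟩
  · rintro ⟨⟨t1, h1⟩, ⟨t2, h2⟩⟩
    refine ⟨t2, ?_⟩
    have hd : s.drop p.length = t1 := by rw [← h1, List.drop_left]
    rw [← h1, ← hd, List.append_assoc, h2]

lemma pv_prefix_total {α : Type} {p q s : List α} (h1 : p <+: s) (h2 : q <+: s) :
    p <+: q ∨ q <+: p := by
  rcases le_total p.length q.length with h | h
  · left
    rw [List.prefix_iff_eq_take] at h1 h2 ⊢
    rw [h2, List.take_take, min_eq_left h]
    exact h1
  · right
    rw [List.prefix_iff_eq_take] at h1 h2 ⊢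
    rw [h1, List.take_take, min_eq_left h]
    exact h2

lemma pv_sw_split (l p q pq : List Char) (h : pq = p ++ q) :
    PySem.Chars.startswith l pq = true ↔
      PySem.Chars.startswith l p = true ∧ PySem.Chars.startswith (l.drop p.length) q = true := by
  simp only [PySem.Chars.startswith_iff, h]
  exact pv_append_prefix_iff p q l

lemma pv_excl {l p q : List Char} (h : PySem.Chars.startswith l p = true)
    (hpq : ¬ p <+: q) (hqp : ¬ q <+: p) : ¬ PySem.Chars.startswith l q = true := by
  rw [PySem.Chars.startswith_iff] at h
  rw [PySem.Chars.startswith_iff]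
  intro h'
  rcases pv_prefix_total h' h with hc | hc
  · exact hqp hc
  · exact hpq hc

lemma pv_isspace_false (c : Char) (h1 : 33 ≤ c.toNat) (h2 : c.toNat ≤ 132) :
    PySem.Chars.isspace c = false := by
  simp only [PySem.Chars.isspace]
  simp only [Bool.or_eq_false_iff, Bool.and_eq_false_iff, decide_eq_false_iff_not]
  omega

lemma pv_isspace_lowerChar (c : Char) :
    PySem.Chars.isspace (PySem.Chars.lowerChar c) = PySem.Chars.isspace c := by
  rw [PySem.Chars.lowerChar]
  split_ifs with h
  · have hb : 65 ≤ c.toNat ∧ c.toNat ≤ 90 := by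
      rw [PySem.Chars.isupper, Bool.and_eq_true, decide_eq_true_eq, decide_eq_true_eq,
          Char.le_def, Char.le_def, UInt32.le_iff_toNat_le, UInt32.le_iff_toNat_le] at h
      obtain ⟨hA, hZ⟩ := h
      have h65 : ('A' : Char).val.toNat = 65 := by decide
      have h90 : ('Z' : Char).val.toNat = 90 := by decide
      refine ⟨?_, ?_⟩
      · show 65 ≤ c.val.toNat; omega
      · show c.val.toNat ≤ 90; omega
    have hofn : (Char.ofNat (c.toNat + 32)).toNat = c.toNat + 32 := by
      rw [Char.toNat_ofNat, if_pos (Or.inl (by omega))]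
    rw [pv_isspace_false _ (by omega) (by omega),
        pv_isspace_false _ (by omega) (by omega)]
  · rfl

lemma pv_lower_strip (cs : List Char) :
    PySem.Chars.lower (PySem.Chars.strip cs) = PySem.Chars.strip (PySem.Chars.lower cs) := by
  simp only [PySem.Chars.strip, PySem.Chars.lower, PySem.Chars.rstrip, PySem.Chars.lstrip,
    List.dropWhile_map, List.map_reverse, Function.comp_def, pv_isspace_lowerChar]
  congr 1
  rw [← List.map_reverse, List.dropWhile_map]
  simp only [Function.comp_def, pv_isspace_lowerChar]

lemma pv_lower_drop (cs : List Char) (n : Nat) :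
    PySem.Chars.lower (cs.drop n) = (PySem.Chars.lower cs).drop n := by
  simp [PySem.Chars.lower, List.map_drop]

lemma pv_rstrip_prefix (cs : List Char) : PySem.Chars.rstrip cs <+: cs := by
  rw [PySem.Chars.rstrip]
  rw [← List.reverse_reverse cs]
  rw [List.reverse_prefix]
  rw [List.reverse_reverse]
  exact List.dropWhile_suffix _

lemma pv_lstrip_eq_self_of_prefix {x y : List Char}
    (hy : List.dropWhile PySem.Chars.isspace y = y) (h : x <+: y) :
    List.dropWhile PySem.Chars.isspace x = x := by
  rw [List.dropWhile_eq_self_iff] at hy ⊢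
  intro hl
  obtain ⟨t, rfl⟩ := h
  have hl2 : 0 < (x ++ t).length := by simp; omega
  have := hy hl2
  rwa [List.getElem_append_left hl] at this

lemma pv_rstrip_idem (cs : List Char) :
    PySem.Chars.rstrip (PySem.Chars.rstrip cs) = PySem.Chars.rstrip cs := by
  simp [PySem.Chars.rstrip, List.reverse_reverse, List.dropWhile_idempotent]

lemma pv_strip_idem (cs : List Char) :
    PySem.Chars.strip (PySem.Chars.strip cs) = PySem.Chars.strip cs := by
  rw [PySem.Chars.strip, PySem.Chars.strip]
  have h1 : PySem.Chars.lstrip (PySem.Chars.rstrip (PySem.Chars.lstrip cs)) =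
      PySem.Chars.rstrip (PySem.Chars.lstrip cs) := by
    rw [PySem.Chars.lstrip]
    exact pv_lstrip_eq_self_of_prefix
      (by rw [PySem.Chars.lstrip]; exact List.dropWhile_idempotent _ _)
      (pv_rstrip_prefix _)
  rw [h1, pv_rstrip_idem]

-- A's branch value, rewritten in terms of l = lower (strip cs)
lemma pv_branch (cs : List Char) (n : Nat) :
    PySem.Chars.lower (PySem.Chars.strip ((PySem.Chars.strip cs).drop n)) =
      pvT (PySem.Chars.lower (PySem.Chars.strip cs)) n := by
  rw [pv_lower_strip, pvT, pv_lower_drop]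

-- the combinational heart: A's six-way scan equals B's scheme/host decomposition, for any l
lemma pv_core (l : List Char) :
    (if PySem.Chars.startswith l "https://doi.org/".toList then pvT l 16
     else if PySem.Chars.startswith l "http://doi.org/".toList then pvT l 15
     else if PySem.Chars.startswith l "https://dx.doi.org/".toList then pvT l 19
     else if PySem.Chars.startswith l "http://dx.doi.org/".toList then pvT l 18
     else if PySem.Chars.startswith l "doi:".toList then pvT l 4
     else if PySem.Chars.startswith l "doi:".toList then pvT l 4
     else l)
  = (if PySem.Chars.startswith l "doi:".toList then pvT l 4
     else if PySem.Chars.startswith l "https://".toList then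
       (if PySem.Chars.startswith (l.drop 8) "doi.org/".toList then pvT l 16
        else if PySem.Chars.startswith (l.drop 8) "dx.doi.org/".toList then pvT l 19
        else l)
     else if PySem.Chars.startswith l "http://".toList then
       (if PySem.Chars.startswith (l.drop 7) "doi.org/".toList then pvT l 15
        else if PySem.Chars.startswith (l.drop 7) "dx.doi.org/".toList then pvT l 18
        else l)
     else l) := by
  have t1 : "https://doi.org/".toList = "https://".toList ++ "doi.org/".toList := by decide
  have t2 : "http://doi.org/".toList = "http://".toList ++ "doi.org/".toList := by decide
  have t3 : "https://dx.doi.org/".toList = "https://".toList ++ "dx.doi.org/".toList := by decide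
  have t4 : "http://dx.doi.org/".toList = "http://".toList ++ "dx.doi.org/".toList := by decide
  have l8 : "https://".toList.length = 8 := by decide
  have l7 : "http://".toList.length = 7 := by decide
  by_cases m5 : PySem.Chars.startswith l "doi:".toList = true
  · have e1 := pv_excl (q := "https://doi.org/".toList) m5 (by decide) (by decide)
    have e2 := pv_excl (q := "http://doi.org/".toList) m5 (by decide) (by decide)
    have e3 := pv_excl (q := "https://dx.doi.org/".toList) m5 (by decide) (by decide)
    have e4 := pv_excl (q := "http://dx.doi.org/".toList) m5 (by decide) (by decide)
    rw [if_neg e1, if_neg e2, if_neg e3, if_neg e4, if_pos m5, if_pos m5]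
  · by_cases m1 : PySem.Chars.startswith l "https://doi.org/".toList = true
    · have h8 : PySem.Chars.startswith l "https://".toList = true ∧
          PySem.Chars.startswith (l.drop 8) "doi.org/".toList = true := by
        rw [pv_sw_split l _ _ _ t1, l8] at m1; exact m1
      rw [if_pos m1, if_neg m5, if_pos h8.1, if_pos h8.2]
    · by_cases m2 : PySem.Chars.startswith l "http://doi.org/".toList = true
      · have h7 : PySem.Chars.startswith l "http://".toList = true ∧
            PySem.Chars.startswith (l.drop 7) "doi.org/".toList = true := by
          rw [pv_sw_split l _ _ _ t2, l7] at m2; exact m2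
        have e8 := pv_excl (q := "https://".toList) m2 (by decide) (by decide)
        rw [if_neg m1, if_pos m2, if_neg m5, if_neg e8, if_pos h7.1, if_pos h7.2]
      · by_cases m3 : PySem.Chars.startswith l "https://dx.doi.org/".toList = true
        · have h8x : PySem.Chars.startswith l "https://".toList = true ∧
              PySem.Chars.startswith (l.drop 8) "dx.doi.org/".toList = true := by
            rw [pv_sw_split l _ _ _ t3, l8] at m3; exact m3
          have d8 : ¬ PySem.Chars.startswith (l.drop 8) "doi.org/".toList = true := by
            intro hd
            exact m1 (by rw [pv_sw_split l _ _ _ t1, l8]; exact ⟨h8x.1, hd⟩)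
          rw [if_neg m1, if_neg m2, if_pos m3, if_neg m5, if_pos h8x.1, if_neg d8, if_pos h8x.2]
        · by_cases m4 : PySem.Chars.startswith l "http://dx.doi.org/".toList = true
          · have h7x : PySem.Chars.startswith l "http://".toList = true ∧
                PySem.Chars.startswith (l.drop 7) "dx.doi.org/".toList = true := by
              rw [pv_sw_split l _ _ _ t4, l7] at m4; exact m4
            have e8 := pv_excl (q := "https://".toList) m4 (by decide) (by decide)
            have d7 : ¬ PySem.Chars.startswith (l.drop 7) "doi.org/".toList = true := by
              intro hd
              exact m2 (by rw [pv_sw_split l _ _ _ t2, l7]; exact ⟨h7x.1, hd⟩)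
            rw [if_neg m1, if_neg m2, if_neg m3, if_pos m4, if_neg m5, if_neg e8, if_pos h7x.1, if_neg d7, if_pos h7x.2]
          · by_cases h8 : PySem.Chars.startswith l "https://".toList = true
            · have d8 : ¬ PySem.Chars.startswith (l.drop 8) "doi.org/".toList = true := by
                intro hd
                exact m1 (by rw [pv_sw_split l _ _ _ t1, l8]; exact ⟨h8, hd⟩)
              have x8 : ¬ PySem.Chars.startswith (l.drop 8) "dx.doi.org/".toList = true := by
                intro hd
                exact m3 (by rw [pv_sw_split l _ _ _ t3, l8]; exact ⟨h8, hd⟩)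
              rw [if_neg m1, if_neg m2, if_neg m3, if_neg m4, if_neg m5, if_neg m5, if_neg m5, if_pos h8, if_neg d8, if_neg x8]
            · by_cases h7 : PySem.Chars.startswith l "http://".toList = true
              · have d7 : ¬ PySem.Chars.startswith (l.drop 7) "doi.org/".toList = true := by
                  intro hd
                  exact m2 (by rw [pv_sw_split l _ _ _ t2, l7]; exact ⟨h7, hd⟩)
                have x7 : ¬ PySem.Chars.startswith (l.drop 7) "dx.doi.org/".toList = true := by
                  intro hd
                  exact m4 (by rw [pv_sw_split l _ _ _ t4, l7]; exact ⟨h7, hd⟩)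
                rw [if_neg m1, if_neg m2, if_neg m3, if_neg m4, if_neg m5, if_neg m5, if_neg m5, if_neg h8, if_pos h7, if_neg d7, if_neg x7]
              · rw [if_neg m1, if_neg m2, if_neg m3, if_neg m4, if_neg m5, if_neg m5, if_neg m5, if_neg h8, if_neg h7]

-- A's port, read on the list side in terms of l = lower (strip doi.toList)
lemma pv_A_toList (doi : String) (h0 : ¬ doi = "") :
    (normalize_doi doi).toList =
      (if PySem.Chars.startswith (PySem.Chars.lower (PySem.Chars.strip doi.toList)) "https://doi.org/".toList then pvT (PySem.Chars.lower (PySem.Chars.strip doi.toList)) 16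
       else if PySem.Chars.startswith (PySem.Chars.lower (PySem.Chars.strip doi.toList)) "http://doi.org/".toList then pvT (PySem.Chars.lower (PySem.Chars.strip doi.toList)) 15
       else if PySem.Chars.startswith (PySem.Chars.lower (PySem.Chars.strip doi.toList)) "https://dx.doi.org/".toList then pvT (PySem.Chars.lower (PySem.Chars.strip doi.toList)) 19
       else if PySem.Chars.startswith (PySem.Chars.lower (PySem.Chars.strip doi.toList)) "http://dx.doi.org/".toList then pvT (PySem.Chars.lower (PySem.Chars.strip doi.toList)) 18
       else if PySem.Chars.startswith (PySem.Chars.lower (PySem.Chars.strip doi.toList)) "doi:".toList then pvT (PySem.Chars.lower (PySem.Chars.strip doi.toList)) 4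
       else if PySem.Chars.startswith (PySem.Chars.lower (PySem.Chars.strip doi.toList)) "doi:".toList then pvT (PySem.Chars.lower (PySem.Chars.strip doi.toList)) 4
       else PySem.Chars.lower (PySem.Chars.strip doi.toList)) := by
  have w1 : PySem.Str.lower "https://doi.org/" = "https://doi.org/" := by decide
  have w2 : PySem.Str.lower "http://doi.org/" = "http://doi.org/" := by decide
  have w3 : PySem.Str.lower "https://dx.doi.org/" = "https://dx.doi.org/" := by decide
  have w4 : PySem.Str.lower "http://dx.doi.org/" = "http://dx.doi.org/" := by decide
  have w5 : PySem.Str.lower "doi:" = "doi:" := by decide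
  have w6 : PySem.Str.lower "DOI:" = "doi:" := by decide
  have n1 : PySem.Str.len "https://doi.org/" = 16 := by decide
  have n2 : PySem.Str.len "http://doi.org/" = 15 := by decide
  have n3 : PySem.Str.len "https://dx.doi.org/" = 19 := by decide
  have n4 : PySem.Str.len "http://dx.doi.org/" = 18 := by decide
  have n5 : PySem.Str.len "doi:" = 4 := by decide
  have n6 : PySem.Str.len "DOI:" = 4 := by decide
  have s4 : ∀ xs : List Char, PySem.List.slice xs (some (4:Int)) none = xs.drop 4 :=
    fun xs => (PySem.List.slice_from xs (by norm_num)).trans (by rfl)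
  have s15 : ∀ xs : List Char, PySem.List.slice xs (some (15:Int)) none = xs.drop 15 :=
    fun xs => (PySem.List.slice_from xs (by norm_num)).trans (by rfl)
  have s16 : ∀ xs : List Char, PySem.List.slice xs (some (16:Int)) none = xs.drop 16 :=
    fun xs => (PySem.List.slice_from xs (by norm_num)).trans (by rfl)
  have s18 : ∀ xs : List Char, PySem.List.slice xs (some (18:Int)) none = xs.drop 18 :=
    fun xs => (PySem.List.slice_from xs (by norm_num)).trans (by rfl)
  have s19 : ∀ xs : List Char, PySem.List.slice xs (some (19:Int)) none = xs.drop 19 :=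
    fun xs => (PySem.List.slice_from xs (by norm_num)).trans (by rfl)
  rw [normalize_doi, if_neg h0]
  simp only [pvDoiPrefixes, pvStripLoop, w1, w2, w3, w4, w5, w6, n1, n2, n3, n4, n5, n6]
  simp only [apply_ite PySem.Str.strip, apply_ite PySem.Str.lower, apply_ite String.toList,
    PySem.Str.toList_lower, PySem.Str.toList_strip, PySem.Str.startswith_eq,
    PySem.Str.toList_slice, PySem.Chars.slice_eq_listSlice, s4, s15, s16, s18, s19,
    pv_branch, pv_strip_idem]

-- B's port, read on the list side in terms of l = lower (strip doi.toList)
lemma pv_B_toList (doi : String) :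
    (normalize_doi_alt doi).toList =
      (if PySem.Chars.startswith (PySem.Chars.lower (PySem.Chars.strip doi.toList)) "doi:".toList then pvT (PySem.Chars.lower (PySem.Chars.strip doi.toList)) 4
       else if PySem.Chars.startswith (PySem.Chars.lower (PySem.Chars.strip doi.toList)) "https://".toList then
         (if PySem.Chars.startswith ((PySem.Chars.lower (PySem.Chars.strip doi.toList)).drop 8) "doi.org/".toList then pvT (PySem.Chars.lower (PySem.Chars.strip doi.toList)) 16
          else if PySem.Chars.startswith ((PySem.Chars.lower (PySem.Chars.strip doi.toList)).drop 8) "dx.doi.org/".toList then pvT (PySem.Chars.lower (PySem.Chars.strip doi.toList)) 19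
          else PySem.Chars.lower (PySem.Chars.strip doi.toList))
       else if PySem.Chars.startswith (PySem.Chars.lower (PySem.Chars.strip doi.toList)) "http://".toList then
         (if PySem.Chars.startswith ((PySem.Chars.lower (PySem.Chars.strip doi.toList)).drop 7) "doi.org/".toList then pvT (PySem.Chars.lower (PySem.Chars.strip doi.toList)) 15
          else if PySem.Chars.startswith ((PySem.Chars.lower (PySem.Chars.strip doi.toList)).drop 7) "dx.doi.org/".toList then pvT (PySem.Chars.lower (PySem.Chars.strip doi.toList)) 18
          else PySem.Chars.lower (PySem.Chars.strip doi.toList))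
       else PySem.Chars.lower (PySem.Chars.strip doi.toList)) := by
  have s4 : ∀ xs : List Char, PySem.List.slice xs (some (4:Int)) none = xs.drop 4 :=
    fun xs => (PySem.List.slice_from xs (by norm_num)).trans (by rfl)
  have s7 : ∀ xs : List Char, PySem.List.slice xs (some (7:Int)) none = xs.drop 7 :=
    fun xs => (PySem.List.slice_from xs (by norm_num)).trans (by rfl)
  have s8 : ∀ xs : List Char, PySem.List.slice xs (some (8:Int)) none = xs.drop 8 :=
    fun xs => (PySem.List.slice_from xs (by norm_num)).trans (by rfl)
  have s15 : ∀ xs : List Char, PySem.List.slice xs (some (15:Int)) none = xs.drop 15 :=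
    fun xs => (PySem.List.slice_from xs (by norm_num)).trans (by rfl)
  have s16 : ∀ xs : List Char, PySem.List.slice xs (some (16:Int)) none = xs.drop 16 :=
    fun xs => (PySem.List.slice_from xs (by norm_num)).trans (by rfl)
  have s18 : ∀ xs : List Char, PySem.List.slice xs (some (18:Int)) none = xs.drop 18 :=
    fun xs => (PySem.List.slice_from xs (by norm_num)).trans (by rfl)
  have s19 : ∀ xs : List Char, PySem.List.slice xs (some (19:Int)) none = xs.drop 19 :=
    fun xs => (PySem.List.slice_from xs (by norm_num)).trans (by rfl)
  simp only [normalize_doi_alt, pvAltHost, pvT]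
  simp only [apply_ite String.toList, PySem.Str.toList_lower, PySem.Str.toList_strip,
    PySem.Str.startswith_eq, PySem.Str.toList_slice, PySem.Chars.slice_eq_listSlice,
    Int.reduceAdd, s4, s7, s8, s15, s16, s18, s19]

-- ===== VERDICT (by name: the statement is the Claim_ definition above) =====
theorem normalize_doi_spec : Claim_equal_normalize_doi := by
  intro doi _
  unfold Spec_normalize_doi
  by_cases h0 : doi = ""
  · subst h0; decide
  · have h := (pv_A_toList doi h0).trans ((pv_core _).trans (pv_B_toList doi).symm)
    calc normalize_doi doi
        = String.ofList (normalize_doi doi).toList := String.ofList_toList.symm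
      _ = String.ofList (normalize_doi_alt doi).toList := by rw [h]
      _ = normalize_doi_alt doi := String.ofList_toList
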